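-- pv_equiv track=rewrite | github.com/rubygitflow/leetcode_python | free_seats_in_the_row.py | takeFreeSeat
-- ===== SOURCE A (Python) =====
-- from typing import List
--
-- def takeFreeSeat(row: List[int]) -> int:
--     ''' Free seats in the row '''
--     if not row:
--         return 0
--     l, max_dist = 0, 0
--     for r, p in enumerate(row):
--         if p == 0:
--             if row[l] != row[r]:
--                 l = r
--             if r == len(row) - 1:
--                max_dist = max(max_dist, r - l + 1)
--         else:
--             if r == l:
--                 continue
--             if row[l] != row[r]:
--                 if l == 0:
--                     max_dist = r - l
--                 else:
--                     total = r - l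
--                     if total % 2 == 0:
--                         max_dist = max(max_dist, total // 2)
--                     else:
--                         max_dist = max(max_dist, total // 2 + 1)
--                 l = r
--     return max_dist
-- ===== SOURCE B (Python) =====
-- from typing import List
--
-- def takeFreeSeat(row: List[int]) -> int:
--     ''' Free seats in the row '''
--     if not row:
--         return 0
--     # run-length encode the row into (value, count) runs
--     runs = []
--     for x in row:
--         if runs and runs[-1][0] == x:
--             runs[-1][1] += 1
--         else:
--             runs.append([x, 1])
--     # a leading run counts in full when the run after it is non-zero-valued
--     res = runs[0][1] if len(runs) > 1 and runs[1][0] != 0 else 0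
--     # a run followed by a non-zero-valued run contributes half its length, rounded up
--     for (_, c), (w, _) in zip(runs, runs[1:]):
--         if w != 0:
--             res = max(res, (c + 1) // 2)
--     # a trailing zero-valued run counts in full
--     if runs[-1][0] == 0:
--         res = max(res, runs[-1][1])
--     return res
-- ===== Notes on version B (the rewrite author's own statement) =====
-- stated objective: alternative
-- what changed: Replaces A's single pass with a stateful left pointer and in-loop case analysis by a run-length encoding of the row followed by closed-form per-run contributions (leading run, ceil(half) for runs followed by a non-zero run, trailing zero run).
import Mathlib
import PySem

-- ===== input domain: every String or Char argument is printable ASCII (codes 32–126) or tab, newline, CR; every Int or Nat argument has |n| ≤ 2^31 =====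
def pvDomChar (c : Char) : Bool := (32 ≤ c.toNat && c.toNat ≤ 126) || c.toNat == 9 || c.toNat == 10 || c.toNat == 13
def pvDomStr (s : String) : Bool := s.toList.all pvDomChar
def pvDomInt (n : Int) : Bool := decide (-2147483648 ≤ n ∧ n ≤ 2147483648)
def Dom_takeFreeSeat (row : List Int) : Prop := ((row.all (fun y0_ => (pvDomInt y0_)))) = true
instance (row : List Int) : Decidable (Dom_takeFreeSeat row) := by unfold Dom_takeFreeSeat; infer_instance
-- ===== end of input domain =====

-- B replaces A's single pass with a stateful left pointer by a run-length encoding of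
-- the row followed by closed-form per-run contributions (objective: alternative).

-- ===== PORT A =====

-- Python's enumerate(row) starting at k (list of (index, value) pairs)
def pvEnum (k : Nat) : List Int → List (Nat × Int)
  | [] => []
  | x :: xs => (k, x) :: pvEnum (k + 1) xs

-- one iteration of A's for-loop; state is (l, max_dist)
def pvStepA (row : List Int) (n : Nat) (st : Nat × Int) (rp : Nat × Int) : Nat × Int :=
  let l := st.1; let md := st.2; let r := rp.1; let p := rp.2
  if p = 0 then
    let l' := if row.getD l 0 ≠ row.getD r 0 then r else l
    (l', if r = n - 1 then max md ((r : Int) - (l' : Int) + 1) else md)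
  else
    if r = l then (l, md)
    else if row.getD l 0 ≠ row.getD r 0 then
      if l = 0 then (r, (r : Int))
      else
        let total : Int := (r : Int) - (l : Int)
        (r, if total % 2 = 0 then max md (total / 2) else max md (total / 2 + 1))
    else (l, md)

def takeFreeSeat (row : List Int) : Int :=
  if row = [] then 0
  else ((pvEnum 0 row).foldl (pvStepA row row.length) (0, 0)).2

-- ===== PORT B =====

-- Source B's run-building loop body: append x to the run list (increment the last
-- run's count if it has the same value, else start a new run at the end)
def pvAddRun (runs : List (Int × Nat)) (x : Int) : List (Int × Nat) :=
  match runs with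
  | [] => [(x, 1)]
  | [(v, c)] => if v = x then [(v, c + 1)] else [(v, c), (x, 1)]
  | r :: rest => r :: pvAddRun rest x

-- Source B's pair loop body; (c+1)//2 on c ≥ 0 is exactly Int division here
def pvPairStep (res : Int) (p : (Int × Nat) × (Int × Nat)) : Int :=
  if p.2.1 ≠ 0 then max res (((p.1.2 : Int) + 1) / 2) else res

def takeFreeSeat_alt (row : List Int) : Int :=
  if row = [] then 0
  else
    match row.foldl pvAddRun [] with
    | [] => 0   -- unreachable: a nonempty row yields a nonempty run list
    | (v0, c0) :: rest =>
      let runs := (v0, c0) :: rest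
      let res : Int :=
        match rest with
        | (w, _) :: _ => if w ≠ 0 then (c0 : Int) else 0
        | [] => 0
      let res := (runs.zip rest).foldl pvPairStep res
      let lastRun := runs.getLastD (0, 0)
      if lastRun.1 = 0 then max res (lastRun.2 : Int) else res

-- ===== PRECONDITION & SPEC =====
def Spec_takeFreeSeat (row : List Int) (out : Int) : Prop := out = takeFreeSeat_alt row
instance (row : List Int) (out : Int) : Decidable (Spec_takeFreeSeat row out) := by unfold Spec_takeFreeSeat; infer_instance

-- ===== CLAIM (what is proved, stated in full; the proofs are below) =====
def Claim_equal_takeFreeSeat : Prop := ∀ (row : List Int), Dom_takeFreeSeat row → Spec_takeFreeSeat row (takeFreeSeat row)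

-- ===== LEMMAS AND PROOFS =====

-- abstract run lists: (value, count) with counts ≥ 1 and adjacent values distinct
def flattenR : List (Int × Nat) → List Int
  | [] => []
  | (v, m) :: rest => List.replicate m v ++ flattenR rest

def ARvalid : List (Int × Nat) → Prop
  | [] => True
  | [(_, m)] => 1 ≤ m
  | (v, m) :: (w, k) :: rest => 1 ≤ m ∧ v ≠ w ∧ ARvalid ((w, k) :: rest)

-- A's ceil-half expression
def ceilA (t : Int) : Int := if t % 2 = 0 then t / 2 else t / 2 + 1

-- what A's loop computes, run by run (first = "l is still 0", cprev = previous run length)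
def Fa : Bool → Int → Int → List (Int × Nat) → Int
  | _, _, md, [] => md
  | first, cprev, md, (v, m) :: rest =>
    if v = 0 then Fa false (m : Int) (if rest = [] then max md (m : Int) else md) rest
    else Fa false (m : Int) (if first then cprev else max md (ceilA cprev)) rest

-- B's pair contributions, trailing contribution, and A's combined tail value
def Pb : Int → List (Int × Nat) → Int
  | _, [] => 0
  | c, (w, k) :: t => max (if w ≠ 0 then (c + 1) / 2 else 0) (Pb (k : Int) t)

def Tb : List (Int × Nat) → Int
  | [] => 0
  | [(v, m)] => if v = 0 then (m : Int) else 0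
  | _ :: t => Tb t

def Gb : Int → List (Int × Nat) → Int
  | _, [] => 0
  | c, (v, m) :: t => max (if v ≠ 0 then ceilA c else 0)
      (max (if v = 0 ∧ t = [] then (m : Int) else 0) (Gb (m : Int) t))

-- ---- run-length encoding facts ----

theorem pvAddRun_headVal (p : Int × Nat) (t : List (Int × Nat)) (x : Int) :
    ∃ k' t', pvAddRun (p :: t) x = (p.1, k') :: t' := by
  rcases p with ⟨v, c⟩
  rcases t with _ | ⟨q, t⟩
  · by_cases h : v = x
    · exact ⟨c + 1, [], by simp [pvAddRun, h]⟩
    · exact ⟨c, [(x, 1)], by simp [pvAddRun, h]⟩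
  · exact ⟨c, pvAddRun (q :: t) x, rfl⟩

theorem ARvalid_pvAddRun (rs : List (Int × Nat)) (x : Int) (h : ARvalid rs) :
    ARvalid (pvAddRun rs x) := by
  induction rs with
  | nil => simp [pvAddRun, ARvalid]
  | cons p t ih =>
    rcases p with ⟨v, c⟩
    rcases t with _ | ⟨⟨w, k⟩, t⟩
    · simp only [ARvalid] at h
      by_cases hvx : v = x
      · simp only [pvAddRun, if_pos hvx, ARvalid]; omega
      · simp only [pvAddRun, if_neg hvx, ARvalid]
        exact ⟨h, hvx, le_refl 1⟩
    · simp only [ARvalid] at h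
      obtain ⟨h1, h2, h3⟩ := h
      have hrec := ih h3
      obtain ⟨k', t', he⟩ := pvAddRun_headVal (w, k) t x
      show ARvalid ((v, c) :: pvAddRun ((w, k) :: t) x)
      rw [he] at hrec ⊢
      exact ⟨h1, h2, hrec⟩

theorem flattenR_pvAddRun (rs : List (Int × Nat)) (x : Int) :
    flattenR (pvAddRun rs x) = flattenR rs ++ [x] := by
  induction rs with
  | nil => simp [pvAddRun, flattenR]
  | cons p t ih =>
    rcases p with ⟨v, c⟩
    rcases t with _ | ⟨q, t⟩
    · by_cases hvx : v = x
      · subst hvx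
        simp [pvAddRun, flattenR, List.replicate_succ']
      · simp [pvAddRun, hvx, flattenR]
    · show flattenR ((v, c) :: pvAddRun (q :: t) x) = _
      simp [flattenR, ih]

theorem rle_spec (row : List Int) :
    flattenR (row.foldl pvAddRun []) = row ∧ ARvalid (row.foldl pvAddRun []) := by
  induction row using List.reverseRecOn with
  | nil => simp [flattenR, ARvalid]
  | append_singleton ys x ih =>
    rw [List.foldl_append]
    simp only [List.foldl_cons, List.foldl_nil]
    exact ⟨by rw [flattenR_pvAddRun, ih.1], ARvalid_pvAddRun _ x ih.2⟩

theorem ARvalid_cons (v : Int) (m : Nat) (t : List (Int × Nat)) (h : ARvalid ((v, m) :: t)) :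
    1 ≤ m ∧ ARvalid t ∧ (∀ w k t', t = (w, k) :: t' → v ≠ w) := by
  rcases t with _ | ⟨⟨w, k⟩, t'⟩
  · simp only [ARvalid] at h ⊢
    exact ⟨h, trivial, by intro _ _ _ h'; cases h'⟩
  · obtain ⟨h1, h2, h3⟩ := h
    refine ⟨h1, h3, ?_⟩
    intro w' k' t'' he
    cases he
    exact h2

theorem flattenR_nil_iff (t : List (Int × Nat)) (hv : ARvalid t) :
    flattenR t = [] ↔ t = [] := by
  constructor
  · intro h
    rcases t with _ | ⟨⟨v, m⟩, t⟩
    · rfl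
    · exfalso
      have hm := (ARvalid_cons v m t hv).1
      simp only [flattenR, List.append_eq_nil_iff, List.replicate_eq_nil_iff] at h
      omega
  · intro h; subst h; rfl

-- ---- positions inside the row ----

theorem getD_of_drop {row z : List Int} {s m : Nat} {v : Int}
    (h : row.drop s = List.replicate m v ++ z) (i : Nat) (hi : i < m) :
    row.getD (s + i) 0 = v := by
  have h1 : (row.drop s)[i]? = row[s + i]? := List.getElem?_drop
  rw [h] at h1
  have h2 : (List.replicate m v ++ z)[i]? = some v := by
    rw [List.getElem?_append_left (by simpa using hi)]
    simp [hi]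
  rw [List.getD_eq_getElem?_getD, ← h1, h2]
  rfl

-- ---- A's loop over one run ----

theorem pvEnum_append (k : Nat) (xs ys : List Int) :
    pvEnum k (xs ++ ys) = pvEnum k xs ++ pvEnum (k + xs.length) ys := by
  induction xs generalizing k with
  | nil => simp [pvEnum]
  | cons x xs ih =>
    simp only [List.cons_append, pvEnum, ih, List.length_cons]
    have : k + 1 + xs.length = k + (xs.length + 1) := by omega
    rw [this]

-- zero run, after the left pointer has settled on its start s
theorem zeroRun (row : List Int) (k : Nat) : ∀ (r s : Nat) (md : Int),
    row.getD s 0 = 0 → (∀ i < k, row.getD (r + i) 0 = 0) → r + k ≤ row.length →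
    (pvEnum r (List.replicate k 0)).foldl (pvStepA row row.length) (s, md)
      = (s, if 0 < k ∧ r + k = row.length then max md ((row.length : Int) - (s : Int)) else md) := by
  induction k with
  | zero => intro r s md _ _ _; simp [pvEnum]
  | succ k ih =>
    intro r s md hs hpos hrk
    have h0 : row.getD r 0 = 0 := by simpa using hpos 0 (by omega)
    rw [List.replicate_succ]
    simp only [pvEnum, List.foldl_cons]
    have hs' : row[s]?.getD 0 = (0 : Int) := by rw [← List.getD_eq_getElem?_getD]; exact hs
    have h0' : row[r]?.getD 0 = (0 : Int) := by rw [← List.getD_eq_getElem?_getD]; exact h0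
    have hstep : pvStepA row row.length (s, md) (r, 0)
        = (s, if r = row.length - 1 then max md ((r : Int) - (s : Int) + 1) else md) := by
      simp [pvStepA, hs', h0']
    rw [hstep]
    have hpos' : ∀ i < k, row.getD (r + 1 + i) 0 = 0 := by
      intro i hi
      have h := hpos (i + 1) (by omega)
      have he : r + (i + 1) = r + 1 + i := by omega
      rwa [he] at h
    rw [ih (r + 1) s _ hs hpos' (by omega)]
    simp only [Prod.mk.injEq, true_and]
    split_ifs <;> omega

-- non-zero run, after the left pointer has settled on its start s
theorem sameRun (row : List Int) (v : Int) (hv : v ≠ 0) (k : Nat) : ∀ (r s : Nat) (md : Int),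
    s < r → row.getD s 0 = v → (∀ i < k, row.getD (r + i) 0 = v) →
    (pvEnum r (List.replicate k v)).foldl (pvStepA row row.length) (s, md) = (s, md) := by
  induction k with
  | zero => intro r s md _ _ _; simp [pvEnum]
  | succ k ih =>
    intro r s md hsr hs hpos
    have h0 : row.getD r 0 = v := by simpa using hpos 0 (by omega)
    rw [List.replicate_succ]
    simp only [pvEnum, List.foldl_cons]
    have hs' : row[s]?.getD 0 = v := by rw [← List.getD_eq_getElem?_getD]; exact hs
    have h0' : row[r]?.getD 0 = v := by rw [← List.getD_eq_getElem?_getD]; exact h0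
    have hstep : pvStepA row row.length (s, md) (r, v) = (s, md) := by
      have hrs : ¬(r = s) := by omega
      simp [pvStepA, hs', h0', hv, hrs]
    rw [hstep]
    have hpos' : ∀ i < k, row.getD (r + 1 + i) 0 = v := by
      intro i hi
      have h := hpos (i + 1) (by omega)
      have he : r + (i + 1) = r + 1 + i := by omega
      rwa [he] at h
    exact ih (r + 1) s md (by omega) hs hpos'

-- a full non-first run: transition at its start s, then the rest of the run
theorem runA (row : List Int) (v u : Int) (m s l : Nat) (md : Int)
    (hl : l < s) (hu : row.getD l 0 = u) (huv : u ≠ v) (hm : 1 ≤ m)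
    (hpos : ∀ i < m, row.getD (s + i) 0 = v) (hsm : s + m ≤ row.length) :
    (pvEnum s (List.replicate m v)).foldl (pvStepA row row.length) (l, md)
      = if v = 0 then (s, if s + m = row.length then max md ((row.length : Int) - (s : Int)) else md)
        else (s, if l = 0 then (s : Int) else max md (ceilA ((s : Int) - (l : Int)))) := by
  obtain ⟨k, rfl⟩ : ∃ k, m = k + 1 := ⟨m - 1, by omega⟩
  have h0 : row.getD s 0 = v := by simpa using hpos 0 (by omega)
  rw [List.replicate_succ]
  simp only [pvEnum, List.foldl_cons]
  have hu' : row[l]?.getD 0 = u := by rw [← List.getD_eq_getElem?_getD]; exact hu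
  have h0' : row[s]?.getD 0 = v := by rw [← List.getD_eq_getElem?_getD]; exact h0
  have hpos' : ∀ i < k, row.getD (s + 1 + i) 0 = v := by
    intro i hi
    have h := hpos (i + 1) (by omega)
    have he : s + (i + 1) = s + 1 + i := by omega
    rwa [he] at h
  by_cases hv0 : v = 0
  · subst hv0
    rw [if_pos rfl]
    have hstep : pvStepA row row.length (l, md) (s, 0)
        = (s, if s = row.length - 1 then max md ((s : Int) - (s : Int) + 1) else md) := by
      have hne2 : row[l]?.getD 0 ≠ row[s]?.getD 0 := by rw [hu', h0']; exact huv
      simp [pvStepA, hne2]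
    rw [hstep]
    rw [zeroRun row k (s + 1) s _ h0 hpos' (by omega)]
    simp only [Prod.mk.injEq, true_and]
    split_ifs <;> omega
  · rw [if_neg hv0]
    have hstep : pvStepA row row.length (l, md) (s, v)
        = (s, if l = 0 then (s : Int) else max md (ceilA ((s : Int) - (l : Int)))) := by
      have hsl : ¬(s = l) := by omega
      have hne2 : row[l]?.getD 0 ≠ row[s]?.getD 0 := by rw [hu', h0']; exact huv
      simp only [pvStepA, if_neg hv0, if_neg hsl, ceilA]
      simp only [List.getD_eq_getElem?_getD, if_pos hne2]
      split_ifs <;> rfl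
    rw [hstep]
    by_cases hl0 : l = 0
    · rw [if_pos hl0]
      exact sameRun row v hv0 k (s + 1) s _ (by omega) h0 hpos'
    · rw [if_neg hl0]
      exact sameRun row v hv0 k (s + 1) s _ (by omega) h0 hpos'

-- the first run: the left pointer never moves, nothing is recorded unless all zeros
theorem firstRun (row : List Int) (v0 : Int) (k : Nat) : ∀ (r : Nat) (md : Int),
    row.getD 0 0 = v0 → (∀ i < k, row.getD (r + i) 0 = v0) → r + k ≤ row.length →
    (pvEnum r (List.replicate k v0)).foldl (pvStepA row row.length) (0, md)
      = (0, if v0 = 0 ∧ 0 < k ∧ r + k = row.length then max md (row.length : Int) else md) := by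
  induction k with
  | zero => intro r md _ _ _; simp [pvEnum]
  | succ k ih =>
    intro r md h00 hpos hrk
    have h0 : row.getD r 0 = v0 := by simpa using hpos 0 (by omega)
    rw [List.replicate_succ]
    simp only [pvEnum, List.foldl_cons]
    have h00' : row[0]?.getD 0 = v0 := by rw [← List.getD_eq_getElem?_getD]; exact h00
    have h0' : row[r]?.getD 0 = v0 := by rw [← List.getD_eq_getElem?_getD]; exact h0
    have hpos' : ∀ i < k, row.getD (r + 1 + i) 0 = v0 := by
      intro i hi
      have h := hpos (i + 1) (by omega)
      have he : r + (i + 1) = r + 1 + i := by omega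
      rwa [he] at h
    by_cases hv0 : v0 = 0
    · subst hv0
      have hstep : pvStepA row row.length (0, md) (r, 0)
          = (0, if r = row.length - 1 then max md ((r : Int) + 1) else md) := by
        simp [pvStepA, h00', h0']
      rw [hstep]
      rw [ih (r + 1) _ h00 hpos' (by omega)]
      simp only [Prod.mk.injEq, true_and]
      split_ifs <;> omega
    · have hstep : pvStepA row row.length (0, md) (r, v0) = (0, md) := by
        by_cases hr0 : r = 0
        · subst hr0; simp [pvStepA, hv0]
        · simp [pvStepA, hv0, hr0, h00', h0']
      rw [hstep]
      rw [ih (r + 1) _ h00 hpos' (by omega)]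
      simp [hv0]

-- chaining runs: A's fold over the remaining runs equals Fa
theorem chainA (rest : List (Int × Nat)) : ∀ (row : List Int) (s l : Nat) (md u : Int),
    row.drop s = flattenR rest → l < s → row.getD l 0 = u →
    (∀ v m t, rest = (v, m) :: t → u ≠ v) → ARvalid rest →
    ((pvEnum s (flattenR rest)).foldl (pvStepA row row.length) (l, md)).2
      = Fa (decide (l = 0)) ((s : Int) - (l : Int)) md rest := by
  induction rest with
  | nil => intro row s l md u _ _ _ _ _; simp [flattenR, pvEnum, Fa]
  | cons p t ih =>
    rcases p with ⟨v, m⟩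
    intro row s l md u hdrop hl hu hhead hv
    obtain ⟨hm, hvt, hnext⟩ := ARvalid_cons v m t hv
    have huv : u ≠ v := hhead v m t rfl
    have hdrop2 : row.drop s = List.replicate m v ++ flattenR t := hdrop
    have hlen : row.length ≥ s + m ∧ row.length = s + m + (flattenR t).length := by
      have hc := congrArg List.length hdrop2
      simp only [List.length_drop, List.length_append, List.length_replicate] at hc
      omega
    have hpos : ∀ i < m, row.getD (s + i) 0 = v := fun i hi => getD_of_drop hdrop2 i hi
    have hs0 : row.getD s 0 = v := by simpa using hpos 0 (by omega)
    have hdrop' : row.drop (s + m) = flattenR t := by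
      have h1 : List.drop m (List.drop s row) = List.drop (s + m) row := List.drop_drop
      rw [← h1, hdrop2, List.drop_append_of_le_length (by simp)]
      simp
    have hflat : flattenR ((v, m) :: t) = List.replicate m v ++ flattenR t := rfl
    rw [hflat, pvEnum_append, List.foldl_append, List.length_replicate]
    rw [runA row v u m s l md hl hu huv hm hpos (by omega)]
    have hsne : s ≠ 0 := by omega
    have htiff : s + m = row.length ↔ t = [] := by
      constructor
      · intro h
        have : (flattenR t).length = 0 := by omega
        exact (flattenR_nil_iff t hvt).1 (List.length_eq_zero_iff.1 this)
      · intro h; subst h; simp [flattenR] at hlen ⊢; omega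
    have hFa : Fa (decide (l = 0)) ((s : Int) - (l : Int)) md ((v, m) :: t)
        = if v = 0 then Fa false (m : Int) (if t = [] then max md (m : Int) else md) t
          else Fa false (m : Int) (if decide (l = 0) then (s : Int) - (l : Int)
            else max md (ceilA ((s : Int) - (l : Int)))) t := rfl
    rw [hFa]
    have hd : (decide (s = 0)) = false := by simp [hsne]
    have hc1 : ((s + m : Nat) : Int) - (s : Int) = (m : Int) := by push_cast; ring
    by_cases hv0 : v = 0
    · simp only [if_pos hv0]
      rw [ih row (s + m) s _ v hdrop' (by omega) hs0 hnext hvt]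
      rw [hd, hc1]
      congr 1
      by_cases ht : t = []
      · rw [if_pos (htiff.2 ht), if_pos ht]
        have hlt : (flattenR t).length = 0 := by subst ht; rfl
        have he : ((row.length : Int) - (s : Int)) = (m : Int) := by omega
        rw [he]
      · rw [if_neg (fun h => ht (htiff.1 h)), if_neg ht]
    · simp only [if_neg hv0]
      rw [ih row (s + m) s _ v hdrop' (by omega) hs0 hnext hvt]
      rw [hd, hc1]
      congr 1
      by_cases hl0 : l = 0
      · subst hl0
        simp
      · have hd2 : (decide (l = 0)) = false := by simp [hl0]
        rw [hd2, if_neg hl0]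
        simp

theorem A_eq_Fa (v0 : Int) (c0 : Nat) (rest : List (Int × Nat)) (row : List Int)
    (hrow : flattenR ((v0, c0) :: rest) = row) (hv : ARvalid ((v0, c0) :: rest)) :
    takeFreeSeat row = Fa true (c0 : Int) (if v0 = 0 ∧ rest = [] then (c0 : Int) else 0) rest := by
  obtain ⟨hc0, hvrest, hheadne⟩ := ARvalid_cons v0 c0 rest hv
  have rowEq : row = List.replicate c0 v0 ++ flattenR rest := by rw [← hrow]; rfl
  have hne : row ≠ [] := by
    rw [rowEq]
    simp only [ne_eq, List.append_eq_nil_iff, List.replicate_eq_nil_iff, not_and]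
    intro h; omega
  have hlen : row.length = c0 + (flattenR rest).length := by
    rw [rowEq]; simp
  have hdrop0 : row.drop 0 = List.replicate c0 v0 ++ flattenR rest := by
    simpa using rowEq
  have hpos : ∀ i < c0, row.getD (0 + i) 0 = v0 := fun i hi => getD_of_drop hdrop0 i hi
  have h00 : row.getD 0 0 = v0 := by simpa using hpos 0 (by omega)
  have hsplit : pvEnum 0 row = pvEnum 0 (List.replicate c0 v0) ++ pvEnum (0 + c0) (flattenR rest) := by
    rw [rowEq, pvEnum_append, List.length_replicate]
  simp only [takeFreeSeat, if_neg hne]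
  rw [hsplit, List.foldl_append]
  rw [firstRun row v0 c0 0 0 h00 hpos (by omega)]
  rcases rest with _ | ⟨⟨v1, c1⟩, t⟩
  · have hn : row.length = c0 := by simpa [flattenR] using hlen
    simp only [flattenR, pvEnum, List.foldl_nil, Fa, max_def, eq_self_iff_true, and_true]
    split_ifs <;> omega
  · have hrne : flattenR ((v1, c1) :: t) ≠ [] := by
      intro h
      exact absurd ((flattenR_nil_iff _ hvrest).1 h) (by simp)
    have hrlen : 0 < (flattenR ((v1, c1) :: t)).length := List.length_pos_iff.2 hrne
    have hdropc : row.drop c0 = flattenR ((v1, c1) :: t) := by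
      rw [rowEq]
      rw [List.drop_append_of_le_length (by simp)]
      simp
    have := chainA ((v1, c1) :: t) row c0 0 (if v0 = 0 ∧ 0 < c0 ∧ 0 + c0 = row.length
        then max 0 (row.length : Int) else 0) v0 hdropc (by omega) h00 hheadne hvrest
    rw [show (0 : Nat) + c0 = c0 from by omega] at this ⊢
    rw [this]
    have hmd0 : (if v0 = 0 ∧ 0 < c0 ∧ c0 = row.length then max 0 (row.length : Int) else 0) = 0 := by
      rw [if_neg]; intro h; omega
    rw [hmd0]
    have h1 : (decide ((0 : Nat) = 0)) = true := by simp
    rw [h1]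
    have h2 : ((c0 : Int) - ((0 : Nat) : Int)) = (c0 : Int) := by simp
    rw [h2]
    rw [if_neg (by simp)]

-- ---- Fa versus B's closed-form contributions ----

theorem Pb_nonneg (t : List (Int × Nat)) : ∀ c, 0 ≤ Pb c t := by
  induction t with
  | nil => intro c; simp [Pb]
  | cons q t ih =>
    rcases q with ⟨w, k⟩
    intro c
    exact le_trans (ih (k : Int)) (le_max_right _ _)

theorem Tb_nonneg : ∀ (t : List (Int × Nat)), 0 ≤ Tb t
  | [] => by simp [Tb]
  | [(v, m)] => by simp only [Tb]; split_ifs <;> omega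
  | p :: q :: t => Tb_nonneg (q :: t)

theorem Gb_nonneg (t : List (Int × Nat)) : ∀ c, 0 ≤ Gb c t := by
  induction t with
  | nil => intro c; simp [Gb]
  | cons q t ih =>
    rcases q with ⟨v, m⟩
    intro c
    exact le_trans (ih (m : Int)) (le_trans (le_max_right _ _) (le_max_right _ _))

theorem Fa_false (t : List (Int × Nat)) : ∀ (c md : Int), 0 ≤ c → 0 ≤ md →
    Fa false c md t = max md (Gb c t) := by
  induction t with
  | nil =>
    intro c md _ hmd
    simp only [Fa, Gb]
    rw [max_eq_left hmd]
  | cons q t ih =>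
    rcases q with ⟨v, m⟩
    intro c md hc hmd
    have hGb := Gb_nonneg t (m : Int)
    have hcA : 0 ≤ ceilA c := by unfold ceilA; split_ifs <;> omega
    by_cases hv0 : v = 0
    · subst hv0
      by_cases ht : t = []
      · subst ht
        simp only [Fa, Gb, max_def, eq_self_iff_true, and_true, if_true, ne_eq,
          not_true_eq_false, if_false]
        split_ifs <;> omega
      · have hFa : Fa false c md ((0, m) :: t) = Fa false (m : Int) md t := by
          simp [Fa, ht]
        have hGbc : Gb c ((0, m) :: t) = max 0 (max 0 (Gb (m : Int) t)) := by
          simp [Gb, ht]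
        rw [hFa, ih (m : Int) md (by positivity) hmd, hGbc]
        simp only [max_def]
        split_ifs <;> omega
    · have hFa : Fa false c md ((v, m) :: t) = Fa false (m : Int) (max md (ceilA c)) t := by
        simp [Fa, hv0]
      have hGbc : Gb c ((v, m) :: t) = max (ceilA c) (max 0 (Gb (m : Int) t)) := by
        simp [Gb, hv0]
      rw [hFa, ih (m : Int) _ (by positivity) (le_trans hmd (le_max_left _ _)), hGbc]
      simp only [max_def]
      split_ifs <;> omega

theorem Tb_cons (p : Int × Nat) (t : List (Int × Nat)) (ht : t ≠ []) : Tb (p :: t) = Tb t := by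
  rcases t with _ | ⟨q, t⟩
  · exact absurd rfl ht
  · rfl

theorem Gb_split (t : List (Int × Nat)) : ∀ c, 0 ≤ c → t ≠ [] →
    Gb c t = max (Pb c t) (Tb t) := by
  induction t with
  | nil => intro c _ h; exact absurd rfl h
  | cons q t ih =>
    rcases q with ⟨v, m⟩
    intro c hc _
    by_cases ht : t = []
    · subst ht
      simp only [Gb, Pb, Tb, ceilA, max_def, eq_self_iff_true, and_true]
      split_ifs <;> omega
    · rw [Tb_cons _ _ ht]
      simp only [Gb, Pb]
      rw [ih (m : Int) (by omega) ht]
      have h1 := Pb_nonneg t (m : Int)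
      have h2 := Tb_nonneg t
      have h3 := Gb_nonneg t (m : Int)
      simp only [if_neg (by simp [ht] : ¬(v = 0 ∧ t = [])), ceilA, max_def]
      split_ifs <;> omega

-- ---- B's port in terms of Pb and Tb ----

-- the "leading run" contribution in B's port
def leadOf (c0 : Nat) : List (Int × Nat) → Int
  | (w, _) :: _ => if w ≠ 0 then (c0 : Int) else 0
  | [] => 0

theorem zip_fold (rest : List (Int × Nat)) : ∀ (v0 : Int) (c0 : Nat) (res : Int), 0 ≤ res →
    ((((v0, c0) :: rest).zip rest).foldl pvPairStep res) = max res (Pb (c0 : Int) rest) := by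
  induction rest with
  | nil =>
    intro v0 c0 res hres
    simp only [List.zip_nil_right, List.foldl_nil, Pb]
    exact (max_eq_left hres).symm
  | cons q t ih =>
    rcases q with ⟨w, k⟩
    intro v0 c0 res hres
    simp only [List.zip_cons_cons, List.foldl_cons]
    have hp := Pb_nonneg t (k : Int)
    by_cases hw : w = 0
    · have hstep : pvPairStep res ((v0, c0), (w, k)) = res := by simp [pvPairStep, hw]
      rw [hstep, ih w k res hres]
      simp only [Pb, if_neg (by simp [hw] : ¬(w ≠ 0)), max_def]
      split_ifs <;> omega
    · have hstep : pvPairStep res ((v0, c0), (w, k)) = max res (((c0 : Int) + 1) / 2) := by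
        simp [pvPairStep, hw]
      rw [hstep, ih w k _ (le_trans hres (le_max_left _ _))]
      simp only [Pb, if_pos hw, max_def]
      split_ifs <;> omega

theorem last_fold (rest : List (Int × Nat)) : ∀ (v0 : Int) (c0 : Nat) (res : Int), 0 ≤ res →
    (if (((v0, c0) :: rest).getLastD (0, 0)).1 = 0
      then max res ((((v0, c0) :: rest).getLastD (0, 0)).2 : Int) else res)
      = max res (Tb ((v0, c0) :: rest)) := by
  induction rest with
  | nil =>
    intro v0 c0 res hres
    have hgl : ([(v0, c0)] : List (Int × Nat)).getLastD (0, 0) = (v0, c0) := rfl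
    rw [hgl]
    simp only [Tb]
    split_ifs
    · rfl
    · exact (max_eq_left hres).symm
  | cons q t ih =>
    rcases q with ⟨v1, c1⟩
    intro v0 c0 res hres
    have hgl : ((v0, c0) :: (v1, c1) :: t).getLastD (0, 0) = ((v1, c1) :: t).getLastD (0, 0) := by
      rw [List.getLastD_eq_getLast?, List.getLastD_eq_getLast?, List.getLast?_cons_cons]
    rw [hgl, Tb_cons _ _ (by simp)]
    exact ih v1 c1 res hres

theorem B_eq (v0 : Int) (c0 : Nat) (rest : List (Int × Nat)) (row : List Int)
    (hne : row ≠ []) (hrs : row.foldl pvAddRun [] = (v0, c0) :: rest) :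
    takeFreeSeat_alt row
      = max (max (leadOf c0 rest) (Pb (c0 : Int) rest)) (Tb ((v0, c0) :: rest)) := by
  rcases rest with _ | ⟨⟨v1, c1⟩, t⟩
  · simp only [takeFreeSeat_alt, if_neg hne, hrs]
    rw [zip_fold [] v0 c0 0 le_rfl]
    rw [show leadOf c0 [] = 0 from rfl]
    exact last_fold [] v0 c0 _ (le_trans le_rfl (le_max_left _ _))
  · simp only [takeFreeSeat_alt, if_neg hne, hrs]
    have hlead : (0 : Int) ≤ (if v1 ≠ 0 then (c0 : Int) else 0) := by
      split_ifs <;> simp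
    rw [zip_fold ((v1, c1) :: t) v0 c0 _ hlead]
    rw [show leadOf c0 ((v1, c1) :: t) = (if v1 ≠ 0 then (c0 : Int) else 0) from rfl]
    exact last_fold ((v1, c1) :: t) v0 c0 _ (le_trans hlead (le_max_left _ _))

theorem bridge (v0 : Int) (c0 : Nat) (rest : List (Int × Nat))
    (hv : ARvalid ((v0, c0) :: rest)) :
    Fa true (c0 : Int) (if v0 = 0 ∧ rest = [] then (c0 : Int) else 0) rest
      = max (max (leadOf c0 rest) (Pb (c0 : Int) rest)) (Tb ((v0, c0) :: rest)) := by
  obtain ⟨hc0, hvrest, hheadne⟩ := ARvalid_cons v0 c0 rest hv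
  rcases rest with _ | ⟨⟨v1, c1⟩, t⟩
  · simp only [Fa, Pb, Tb, leadOf, and_true, max_def]
    split_ifs <;> first | contradiction | omega
  · rw [if_neg (by simp)]
    rw [Tb_cons _ _ (by simp)]
    rw [show leadOf c0 ((v1, c1) :: t) = (if v1 ≠ 0 then (c0 : Int) else 0) from rfl]
    simp only [Fa, Pb]
    obtain ⟨hc1, hvt, _⟩ := ARvalid_cons v1 c1 t hvrest
    by_cases hv1 : v1 = 0
    · subst hv1
      simp only [if_pos rfl, ne_eq, not_true_eq_false, if_false]
      by_cases ht : t = []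
      · subst ht
        simp only [Fa, Pb, Tb, max_def, eq_self_iff_true, and_true, if_true]
        split_ifs <;> first | contradiction | omega
      · rw [Fa_false t (c1 : Int) (if t = [] then max 0 (c1 : Int) else 0) (by positivity)
            (by split_ifs <;> simp)]
        rw [Gb_split t (c1 : Int) (by positivity) ht, Tb_cons _ _ ht]
        rw [if_neg ht]
        have h1 := Pb_nonneg t (c1 : Int)
        have h2 := Tb_nonneg t
        simp only [max_def]
        split_ifs <;> first | contradiction | omega
    · simp only [if_neg hv1, ne_eq, hv1, not_false_eq_true, if_true]
      by_cases ht : t = []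
      · subst ht
        simp only [Fa, Pb, Tb, max_def, eq_self_iff_true, and_true, if_true]
        split_ifs <;> first | contradiction | omega
      · rw [Fa_false t (c1 : Int) (c0 : Int) (by positivity) (by positivity)]
        rw [Gb_split t (c1 : Int) (by positivity) ht, Tb_cons _ _ ht]
        have h1 := Pb_nonneg t (c1 : Int)
        have h2 := Tb_nonneg t
        simp only [max_def]
        split_ifs <;> first | contradiction | omega

-- ---- assembly ----

theorem main_eq (row : List Int) : takeFreeSeat row = takeFreeSeat_alt row := by
  by_cases hne : row = []
  · subst hne; rfl
  · obtain ⟨hflat, hv⟩ := rle_spec row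
    rcases hrs : row.foldl pvAddRun [] with _ | ⟨⟨v0, c0⟩, rest⟩
    · rw [hrs] at hflat
      exact absurd hflat.symm hne
    · rw [hrs] at hflat hv
      rw [A_eq_Fa v0 c0 rest row hflat hv]
      rw [B_eq v0 c0 rest row hne hrs]
      exact bridge v0 c0 rest hv

-- ===== VERDICT (by name: the statement is the Claim_ definition above) =====
theorem takeFreeSeat_spec : Claim_equal_takeFreeSeat := by
  intro row _
  unfold Spec_takeFreeSeat
  exact main_eq row
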